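-- pv_equiv track=rewrite | github.com/GayathriKumar96/MSC-AI | COMP SEC Programs/c4p1.py | vector_len_l2
-- ===== SOURCE A (Python) =====
-- def vector_len_l2(b,m,n):
--     vec_len = []
--     for i in range(n):
--         sum = 0
--         for j in range(m):
--             sum+=int(b[j][i])**2
--         vec_len.append(sum)
--     return vec_len
-- ===== SOURCE B (Python) =====
-- def vector_len_l2(b, m, n):
--     vec_len = [0] * n
--     if not vec_len:
--         return vec_len
--     for j in range(m):
--         for i in range(n):
--             vec_len[i] += int(b[j][i]) ** 2
--     return vec_len
-- ===== Notes on version B (the rewrite author's own statement) =====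
-- stated objective: alternative
-- what changed: Interchanged the loop nest: B traverses the matrix row-major, maintaining all n column accumulators in a pre-allocated list updated in place, instead of A's column-major recomputation that appends one finished column sum at a time.
import Mathlib
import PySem

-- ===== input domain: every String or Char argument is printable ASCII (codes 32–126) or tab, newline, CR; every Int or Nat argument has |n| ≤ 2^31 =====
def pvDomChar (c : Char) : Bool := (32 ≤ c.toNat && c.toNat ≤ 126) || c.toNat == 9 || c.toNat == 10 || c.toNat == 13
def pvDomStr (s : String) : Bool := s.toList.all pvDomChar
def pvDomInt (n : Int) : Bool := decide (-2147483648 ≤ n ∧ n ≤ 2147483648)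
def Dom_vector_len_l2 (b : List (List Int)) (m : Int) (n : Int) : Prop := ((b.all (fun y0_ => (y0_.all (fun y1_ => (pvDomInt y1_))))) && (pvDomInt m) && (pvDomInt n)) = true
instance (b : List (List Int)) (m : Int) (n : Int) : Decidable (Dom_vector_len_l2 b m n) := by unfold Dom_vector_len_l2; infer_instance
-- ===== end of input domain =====

-- B interchanges the loop nest: row-major traversal updating all n column accumulators in place,
-- instead of A's column-major append of one finished column sum at a time (objective: alternative).

-- ===== PORT A =====
-- literal port of A: for i in range(n): sum = 0; for j in range(m): sum += b[j][i]**2; append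
def vector_len_l2 (b : List (List Int)) (m : Int) (n : Int) : List Int :=
  (PySem.List.pyRange 0 n 1).foldl (fun vec_len i =>
    vec_len ++ [(PySem.List.pyRange 0 m 1).foldl (fun s j =>
      s + (PySem.List.pyGetD (PySem.List.pyGetD b j []) i 0) ^ 2) 0]) []

-- ===== PORT B =====
-- literal port of Source B: vec_len = [0]*n ; if not vec_len: return vec_len ; row-major double loop.
-- [0]*n is List.replicate n.toNat 0 (empty for n ≤ 0, as in Python); the loop indices i, j are
-- always ≥ 0 (they come from range), so pySetD/i.toNat are exact here.
def vector_len_l2_alt (b : List (List Int)) (m : Int) (n : Int) : List Int :=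
  if List.replicate n.toNat (0 : Int) = [] then List.replicate n.toNat 0 else
  (PySem.List.pyRange 0 m 1).foldl (fun vec_len j =>
    (PySem.List.pyRange 0 n 1).foldl (fun v i =>
      PySem.List.pySetD v i
        (PySem.List.pyGetD v i 0 + (PySem.List.pyGetD (PySem.List.pyGetD b j []) i 0) ^ 2)) vec_len)
    (List.replicate n.toNat 0)

-- ===== PRECONDITION & SPEC =====
-- exactly the inputs where Python A returns (no IndexError): indexing only happens when m > 0 and n > 0,
-- and then rows 0..m-1 must exist and each have length ≥ n.
def Pre_vector_len_l2 (b : List (List Int)) (m : Int) (n : Int) : Prop :=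
  (0 < m ∧ 0 < n) → (m ≤ b.length ∧ ∀ row ∈ b.take m.toNat, n ≤ row.length)
instance (b : List (List Int)) (m : Int) (n : Int) : Decidable (Pre_vector_len_l2 b m n) := by
  unfold Pre_vector_len_l2; infer_instance
def pvWitness_vector_len_l2 : List (List Int) × Int × Int := ([[1, 2], [3, 4]], 2, 2)

def Spec_vector_len_l2 (b : List (List Int)) (m : Int) (n : Int) (out : List Int) : Prop := out = vector_len_l2_alt b m n
instance (b : List (List Int)) (m : Int) (n : Int) (out : List Int) : Decidable (Spec_vector_len_l2 b m n out) := by unfold Spec_vector_len_l2; infer_instance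

-- ===== CLAIM (what is proved, stated in full; the proofs are below) =====
def Claim_equal_vector_len_l2 : Prop := ∀ (b : List (List Int)) (m : Int) (n : Int), Dom_vector_len_l2 b m n → Pre_vector_len_l2 b m n → Spec_vector_len_l2 b m n (vector_len_l2 b m n)

-- ===== LEMMAS AND PROOFS =====

-- one row-pass of B over a state of shape (range N).map g adds q i to every slot
theorem pv_inner_pass (N : ℕ) (g q : ℕ → Int) :
    ∀ (k : ℕ), k ≤ N →
      (List.range k).foldl
        (fun v (i : ℕ) =>
          PySem.List.pySetD v (i : Int) (PySem.List.pyGetD v (i : Int) 0 + q i))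
        ((List.range N).map g)
      = (List.range N).map (fun i => if i < k then g i + q i else g i) := by
  intro k
  induction k with
  | zero =>
      intro _
      simp
  | succ k ih =>
      intro hk
      rw [List.range_succ, List.foldl_append, ih (Nat.le_of_succ_le hk)]
      simp only [List.foldl_cons, List.foldl_nil]
      rw [PySem.List.pySetD_natCast, PySem.List.pyGetD_natCast]
      rw [List.getD_eq_getElem _ _ (by simp; omega)]
      apply List.ext_getElem
      · simp
      · intro idx h1 h2
        simp only [List.getElem_set, List.getElem_map, List.getElem_range]
        by_cases hik : k = idx
        · subst hik
          simp
        · rw [if_neg hik]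
          by_cases h3 : idx < k
          · rw [if_pos h3, if_pos (Nat.lt_succ_of_lt h3)]
          · rw [if_neg h3, if_neg (by omega : ¬ idx < k + 1)]

-- B's outer fold over any list of row indices, starting from (range n.toNat).map g
theorem pv_outer (b : List (List Int)) (n : Int) :
    ∀ (js : List Int) (g : ℕ → Int),
      js.foldl (fun vec_len j =>
        (PySem.List.pyRange 0 n 1).foldl (fun v i =>
          PySem.List.pySetD v i
            (PySem.List.pyGetD v i 0 +
              (PySem.List.pyGetD (PySem.List.pyGetD b j []) i 0) ^ 2)) vec_len)
        ((List.range n.toNat).map g)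
      = (List.range n.toNat).map (fun (i : ℕ) =>
          js.foldl (fun s j =>
            s + (PySem.List.pyGetD (PySem.List.pyGetD b j []) (i : Int) 0) ^ 2) (g i)) := by
  intro js
  induction js with
  | nil => intro g; rfl
  | cons j rest ih =>
      intro g
      simp only [List.foldl_cons]
      have hr : PySem.List.pyRange 0 n 1 = (List.range n.toNat).map (fun k : ℕ => (k : Int)) := by
        rw [PySem.List.pyRange_one]
        simp
      rw [hr, List.foldl_map,
        pv_inner_pass n.toNat g
          (fun i => (PySem.List.pyGetD (PySem.List.pyGetD b j []) (i : Int) 0) ^ 2) n.toNat le_rfl]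
      have hm : (List.range n.toNat).map
            (fun i => if i < n.toNat then
              g i + (PySem.List.pyGetD (PySem.List.pyGetD b j []) (i : Int) 0) ^ 2
            else g i)
          = (List.range n.toNat).map
            (fun i => g i + (PySem.List.pyGetD (PySem.List.pyGetD b j []) (i : Int) 0) ^ 2) := by
        apply List.map_congr_left
        intro i hi
        rw [List.mem_range] at hi
        simp [hi]
      rw [hm, ← hr, ih (fun i => g i + (PySem.List.pyGetD (PySem.List.pyGetD b j []) (i : Int) 0) ^ 2)]

-- ===== VERDICT (by name: the statement is the Claim_ definition above) =====
theorem vector_len_l2_spec : Claim_equal_vector_len_l2 := by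
  intro b m n _ _
  unfold Spec_vector_len_l2 vector_len_l2 vector_len_l2_alt
  by_cases hn : n.toNat = 0
  · rw [hn]
    simp [PySem.List.pyRange_one_eq_nil (show n ≤ 0 by omega)]
  · rw [if_neg (by simp [hn] : ¬ (List.replicate n.toNat (0 : Int) = []))]
    have hrepl : List.replicate n.toNat (0 : Int) = (List.range n.toNat).map (fun _ : ℕ => (0 : Int)) := by
      simp
    rw [hrepl, pv_outer b n (PySem.List.pyRange 0 m 1) (fun _ => 0),
      PySem.List.foldl_append_singleton_eq_map, PySem.List.pyRange_one 0 n]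
    simp [List.map_map, Function.comp]
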